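-- pv_equiv track=rewrite | github.com/sfyyes92/blues2 | python/collect.py | pick_yaml_and_txt
-- ===== SOURCE A (Python) =====
-- from typing import Any, Dict, Iterator, List, Optional, Tuple
--
-- def pick_yaml_and_txt(urls: List[str]) -> Tuple[Optional[str], Optional[str]]:
--     """
--     不再强依赖 c.yaml / v.txt 文件名。
--     - yaml: 取第一个 .yaml 或 .yml
--     - txt: 取第一个 .txt
--     """
--     yaml_url = None
--     txt_url = None
--
--     for u in urls:
--         ul = u.lower()
--         if yaml_url is None and (ul.endswith(".yaml") or ul.endswith(".yml")):
--             yaml_url = u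
--         if txt_url is None and ul.endswith(".txt"):
--             txt_url = u
--         if yaml_url and txt_url:
--             break
--
--     return yaml_url, txt_url
-- ===== SOURCE B (Python) =====
-- from typing import List, Optional, Tuple
--
-- def pick_yaml_and_txt(urls: List[str]) -> Tuple[Optional[str], Optional[str]]:
--     yaml_url = next((u for u in urls if u.lower().endswith((".yaml", ".yml"))), None)
--     txt_url = next((u for u in urls if u.lower().endswith(".txt")), None)
--     return yaml_url, txt_url
-- ===== Notes on version B (the rewrite author's own statement) =====
-- stated objective: idiomatic
-- what changed: Replaces the single interleaved loop maintaining two slots with an early break by two independent first-match scans (next over a generator), one per extension.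
import Mathlib
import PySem

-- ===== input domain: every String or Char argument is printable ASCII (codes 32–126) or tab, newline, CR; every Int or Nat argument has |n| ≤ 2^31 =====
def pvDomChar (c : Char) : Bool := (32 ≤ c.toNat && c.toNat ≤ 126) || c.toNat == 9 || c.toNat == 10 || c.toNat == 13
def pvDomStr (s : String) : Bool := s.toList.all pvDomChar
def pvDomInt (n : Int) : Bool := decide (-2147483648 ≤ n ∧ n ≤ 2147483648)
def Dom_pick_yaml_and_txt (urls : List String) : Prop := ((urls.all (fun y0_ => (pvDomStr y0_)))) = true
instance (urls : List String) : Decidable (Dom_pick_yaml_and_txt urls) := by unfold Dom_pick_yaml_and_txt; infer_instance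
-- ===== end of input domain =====

-- ===== PORT A =====
-- header: B computes the two first-match URLs by two independent scans instead of A's
-- single interleaved loop with two slots and an early break (objective: more idiomatic).

-- loop of A: state (yaml_url, txt_url), early break when both are set (matched urls are
-- always non-empty strings, so Python truthiness = isSome here)
def pickLoopA : List String → Option String → Option String → Option String × Option String
  | [], y, t => (y, t)
  | u :: rest, y, t =>
    let ul := PySem.Str.lower u
    let y' := if y = none ∧ (PySem.Str.endswith ul ".yaml" ∨ PySem.Str.endswith ul ".yml") then some u else y
    let t' := if t = none ∧ PySem.Str.endswith ul ".txt" then some u else t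
    if y'.isSome ∧ t'.isSome then (y', t') else pickLoopA rest y' t'

def pick_yaml_and_txt (urls : List String) : Option String × Option String :=
  pickLoopA urls none none

-- ===== PORT B =====
def isYaml (u : String) : Bool :=
  PySem.Str.endswith (PySem.Str.lower u) ".yaml" || PySem.Str.endswith (PySem.Str.lower u) ".yml"

def isTxt (u : String) : Bool := PySem.Str.endswith (PySem.Str.lower u) ".txt"

def pick_yaml_and_txt_alt (urls : List String) : Option String × Option String :=
  (urls.find? isYaml, urls.find? isTxt)

-- ===== PRECONDITION & SPEC =====
def Spec_pick_yaml_and_txt (urls : List String) (out : Option String × Option String) : Prop := out = pick_yaml_and_txt_alt urls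
instance (urls : List String) (out : Option String × Option String) : Decidable (Spec_pick_yaml_and_txt urls out) := by unfold Spec_pick_yaml_and_txt; infer_instance

-- ===== CLAIM (what is proved, stated in full; the proofs are below) =====
def Claim_equal_pick_yaml_and_txt : Prop := ∀ (urls : List String), Dom_pick_yaml_and_txt urls → Spec_pick_yaml_and_txt urls (pick_yaml_and_txt urls)

-- ===== LEMMAS AND PROOFS =====

theorem pickLoopA_eq (urls : List String) (y t : Option String) :
    pickLoopA urls y t = (y.or (urls.find? isYaml), t.or (urls.find? isTxt)) := by
  induction urls generalizing y t with
  | nil => simp [pickLoopA]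
  | cons u rest ih =>
    have hy : (if y = none ∧ (PySem.Str.endswith (PySem.Str.lower u) ".yaml" ∨
        PySem.Str.endswith (PySem.Str.lower u) ".yml") then some u else y)
        = if y = none ∧ isYaml u = true then some u else y := by
      simp [isYaml]
    have ht : (if t = none ∧ PySem.Str.endswith (PySem.Str.lower u) ".txt" then some u else t)
        = if t = none ∧ isTxt u = true then some u else t := by
      simp [isTxt]
    simp only [pickLoopA, hy, ht, List.find?]
    cases y <;> cases t <;> cases hY : isYaml u <;> cases hT : isTxt u <;>
      simp [ih, Option.or]
-- ===== VERDICT (by name: the statement is the Claim_ definition above) =====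
theorem pick_yaml_and_txt_spec : Claim_equal_pick_yaml_and_txt := by
  intro urls _
  show pick_yaml_and_txt urls = pick_yaml_and_txt_alt urls
  simp [pick_yaml_and_txt, pick_yaml_and_txt_alt, pickLoopA_eq, Option.or]
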